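-- pv_equiv track=rewrite | github.com/sxxgwoo/clab | base/dataloader/simul_env.py | time_to_weekgroup
-- ===== SOURCE A (Python) =====
-- def format_str_to_split(time_str, week_str=False):
--     if time_str is None:
--         return {'week':None, 'hour':None, 'min':None}
--     else:
--         week_dict = {"Mon.":0, "Tue.":1, "Wed.":2, "Thu.":3, "Fri.":4, "Sat.":5, "Sun.":6}
--
--         week_string, hour_min_str = time_str.split(" ")
--         hour, min = hour_min_str.split(":")
--
--         return {'week' : week_string if week_str else week_dict[week_string],
--                 'hour': int(hour), 'min': int(min)}
--
-- def time_to_weekgroup(x, name=""):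
--     week_feature = {None: {f"{name}_Week": 0, f"{name}_Sat": 0, f"{name}_Sun": 0}}
--     for i in range(7):
--         if i < 5:
--             week_feature[i] = {f"{name}_Week": 1, f"{name}_Sat": 0, f"{name}_Sun": 0}
--         elif i == 5:
--             week_feature[i] = {f"{name}_Week": 0, f"{name}_Sat": 1, f"{name}_Sun": 0}
--         elif i == 6:
--             week_feature[i] = {f"{name}_Week": 0, f"{name}_Sat": 0, f"{name}_Sun": 1}
--
--     week_code = None if x is None else format_str_to_split(x)['week']
--     return week_feature[week_code]
-- ===== SOURCE B (Python) =====
-- def format_str_to_split(time_str, week_str=False):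
--     if time_str is None:
--         return {'week':None, 'hour':None, 'min':None}
--     else:
--         week_dict = {"Mon.":0, "Tue.":1, "Wed.":2, "Thu.":3, "Fri.":4, "Sat.":5, "Sun.":6}
--
--         week_string, hour_min_str = time_str.split(" ")
--         hour, min = hour_min_str.split(":")
--
--         return {'week' : week_string if week_str else week_dict[week_string],
--                 'hour': int(hour), 'min': int(min)}
--
-- def time_to_weekgroup(x, name=""):
--     week_code = None if x is None else format_str_to_split(x)['week']
--     if week_code is None:
--         return {f"{name}_Week": 0, f"{name}_Sat": 0, f"{name}_Sun": 0}
--     if week_code < 5: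
--         return {f"{name}_Week": 1, f"{name}_Sat": 0, f"{name}_Sun": 0}
--     if week_code == 5:
--         return {f"{name}_Week": 0, f"{name}_Sat": 1, f"{name}_Sun": 0}
--     return {f"{name}_Week": 0, f"{name}_Sat": 0, f"{name}_Sun": 1}
-- ===== Notes on version B (the rewrite author's own statement) =====
-- stated objective: simpler
-- what changed: B drops the 8-entry week_feature table that A builds with a loop and then indexes, and instead branches directly on the parsed week code (None / <5 / ==5 / else) to return the one-hot dict.
import Mathlib
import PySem

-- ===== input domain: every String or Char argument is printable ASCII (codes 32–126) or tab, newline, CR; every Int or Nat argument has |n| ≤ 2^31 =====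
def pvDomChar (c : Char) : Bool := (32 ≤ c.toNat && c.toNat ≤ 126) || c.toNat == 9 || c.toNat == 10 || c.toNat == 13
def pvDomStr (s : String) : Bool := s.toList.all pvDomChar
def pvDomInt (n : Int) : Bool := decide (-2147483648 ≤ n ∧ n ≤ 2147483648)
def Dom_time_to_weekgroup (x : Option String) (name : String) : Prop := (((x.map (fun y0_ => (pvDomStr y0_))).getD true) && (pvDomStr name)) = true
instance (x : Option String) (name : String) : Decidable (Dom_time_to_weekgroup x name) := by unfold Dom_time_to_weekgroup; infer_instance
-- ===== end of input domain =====

-- B replaces A's loop-built 8-entry week_feature table + lookup by a direct branch on the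
-- parsed week code; equivalence is proved on Pre_ (inputs where A's parsing does not raise).

-- ===== PORT A =====
-- Helper of A; week_str is always False at the call site, that branch is ported.
-- Returns none exactly where the Python helper raises (ValueError / KeyError).
def format_str_to_split (time_str : Option String) : Option (PySem.Dict String (Option Int)) :=
  match time_str with
  | none => some (PySem.Dict.ofList [("week", none), ("hour", none), ("min", none)])
  | some s =>
    let week_dict : PySem.Dict String Int :=
      PySem.Dict.ofList [("Mon.", 0), ("Tue.", 1), ("Wed.", 2), ("Thu.", 3), ("Fri.", 4), ("Sat.", 5), ("Sun.", 6)]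
    match PySem.Str.split? s " " with
    | some [week_string, hour_min_str] =>
      match PySem.Str.split? hour_min_str ":" with
      | some [hour, min] =>
        match week_dict.get? week_string, PySem.Int.ofStr? hour, PySem.Int.ofStr? min with
        | some w, some h, some m =>
            some (PySem.Dict.ofList [("week", some w), ("hour", some h), ("min", some m)])
        | _, _, _ => none
      | _ => none
    | _ => none

def time_to_weekgroup (x : Option String) (name : String) : List (String × Int) :=
  let week_feature : PySem.Dict (Option Int) (PySem.Dict String Int) :=
    PySem.Dict.ofList [(none, PySem.Dict.ofList [(name ++ "_Week", 0), (name ++ "_Sat", 0), (name ++ "_Sun", 0)])]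
  let week_feature := (PySem.List.pyRange 0 7 1).foldl (fun wf i =>
    if i < 5 then
      wf.insert (some i) (PySem.Dict.ofList [(name ++ "_Week", 1), (name ++ "_Sat", 0), (name ++ "_Sun", 0)])
    else if i = 5 then
      wf.insert (some i) (PySem.Dict.ofList [(name ++ "_Week", 0), (name ++ "_Sat", 1), (name ++ "_Sun", 0)])
    else if i = 6 then
      wf.insert (some i) (PySem.Dict.ofList [(name ++ "_Week", 0), (name ++ "_Sat", 0), (name ++ "_Sun", 1)])
    else wf) week_feature
  let week_code : Option (Option Int) :=
    match x with
    | none => some none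
    | some _ => (format_str_to_split x).bind (fun d => d.get? "week")
  match week_code with
  | some wc =>
    match week_feature.get? wc with
    | some d => d.items
    | none => []      -- Python raises KeyError here (excluded by Pre_)
  | none => []        -- format_str_to_split raised (excluded by Pre_)

-- ===== PORT B =====
-- Source B uses the same module helper format_str_to_split verbatim; the port shares it.
def time_to_weekgroup_alt (x : Option String) (name : String) : List (String × Int) :=
  let week_code : Option (Option Int) :=
    match x with
    | none => some none
    | some _ => (format_str_to_split x).bind (fun d => d.get? "week")
  match week_code with
  | some none => [(name ++ "_Week", 0), (name ++ "_Sat", 0), (name ++ "_Sun", 0)]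
  | some (some c) =>
    if c < 5 then [(name ++ "_Week", 1), (name ++ "_Sat", 0), (name ++ "_Sun", 0)]
    else if c = 5 then [(name ++ "_Week", 0), (name ++ "_Sat", 1), (name ++ "_Sun", 0)]
    else [(name ++ "_Week", 0), (name ++ "_Sat", 0), (name ++ "_Sun", 1)]
  | none => []        -- helper raised (excluded by Pre_)

-- ===== PRECONDITION & SPEC =====
-- Pre_ excludes exactly the inputs on which A RAISES: x = some s where s does not split as
-- "<weekday-abbrev.> <int>:<int>" (ValueError on unpack / int(), KeyError on the weekday).
def pvParseOK (s : String) : Bool :=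
  match PySem.Str.split? s " " with
  | some [w, hm] =>
    match PySem.Str.split? hm ":" with
    | some [h, m] =>
      ((PySem.Dict.ofList
          [("Mon.", (0:Int)), ("Tue.", 1), ("Wed.", 2), ("Thu.", 3), ("Fri.", 4), ("Sat.", 5), ("Sun.", 6)]).get? w).isSome
        && (PySem.Int.ofStr? h).isSome && (PySem.Int.ofStr? m).isSome
    | _ => false
  | _ => false

def Pre_time_to_weekgroup (x : Option String) (name : String) : Prop :=
  (match x with | none => true | some s => pvParseOK s) = true
instance (x : Option String) (name : String) : Decidable (Pre_time_to_weekgroup x name) := by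
  unfold Pre_time_to_weekgroup; infer_instance

def pvWitness_time_to_weekgroup : Option String × String := (some "Mon. 10:30", "t")

def Spec_time_to_weekgroup (x : Option String) (name : String) (out : List (String × Int)) : Prop := out = time_to_weekgroup_alt x name
instance (x : Option String) (name : String) (out : List (String × Int)) : Decidable (Spec_time_to_weekgroup x name out) := by unfold Spec_time_to_weekgroup; infer_instance

-- ===== CLAIM (what is proved, stated in full; the proofs are below) =====
def Claim_equal_time_to_weekgroup : Prop := ∀ (x : Option String) (name : String), Dom_time_to_weekgroup x name → Pre_time_to_weekgroup x name → Spec_time_to_weekgroup x name (time_to_weekgroup x name)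

-- ===== LEMMAS AND PROOFS =====

theorem time_to_weekgroup_spec : Claim_equal_time_to_weekgroup := by
  intro x name _ hpre
  unfold Spec_time_to_weekgroup
  have hr : PySem.List.pyRange 0 7 1 = [0,1,2,3,4,5,6] := by decide
  cases x with
  | none =>
    simp [time_to_weekgroup, time_to_weekgroup_alt, hr,
          List.foldl, PySem.Dict.ofList, PySem.Dict.update,
          PySem.Dict.get?, PySem.Dict.empty, PySem.Dict.insert]
  | some s =>
    have hp : pvParseOK s = true := hpre
    cases e1 : PySem.Str.split? s " " with
    | none => rw [pvParseOK, e1] at hp; simp at hp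
    | some l =>
      rcases l with _ | ⟨w, l⟩
      · rw [pvParseOK, e1] at hp; simp at hp
      rcases l with _ | ⟨hm, l⟩
      · rw [pvParseOK, e1] at hp; simp at hp
      rcases l with _ | ⟨c3, t⟩
      case cons => rw [pvParseOK, e1] at hp; simp at hp
      rw [pvParseOK] at hp; simp only [e1] at hp
      cases e2 : PySem.Str.split? hm ":" with
      | none => simp only [e2] at hp; simp at hp
      | some l2 =>
        rcases l2 with _ | ⟨h, l2⟩
        · simp only [e2] at hp; simp at hp
        rcases l2 with _ | ⟨m, l2⟩
        · simp only [e2] at hp; simp at hp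
        rcases l2 with _ | ⟨c4, t2⟩
        case cons => rw [e2] at hp; simp at hp
        simp only [e2] at hp
        simp only [Bool.and_eq_true, Option.isSome_iff_exists] at hp
        obtain ⟨⟨⟨c, hc⟩, v, hv⟩, mv, hmv⟩ := hp
        have hcr : 0 ≤ c ∧ c < 7 := by
          have h2 := hc
          rw [show (PySem.Dict.ofList [("Mon.", (0:Int)), ("Tue.", 1), ("Wed.", 2), ("Thu.", 3), ("Fri.", 4), ("Sat.", 5), ("Sun.", 6)])
                = PySem.Dict.mk [("Mon.", (0:Int)), ("Tue.", 1), ("Wed.", 2), ("Thu.", 3), ("Fri.", 4), ("Sat.", 5), ("Sun.", 6)] from by decide] at h2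
          simp only [PySem.Dict.get?_mk_cons] at h2
          split_ifs at h2 <;> simp_all [PySem.Dict.get?] <;> omega
        simp only [time_to_weekgroup, time_to_weekgroup_alt, format_str_to_split,
                   e1, e2, hc, hv, hmv]
        obtain ⟨hc0, hc7⟩ := hcr
        interval_cases c <;>
          simp [hr, List.foldl, PySem.Dict.get?_insert, PySem.Dict.ofList, PySem.Dict.update,
                PySem.Dict.get?, PySem.Dict.empty, PySem.Dict.insert, PySem.Dict.items]
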